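-- pv_equiv track=rewrite | github.com/kanjieater/SubPlz | subplz/align.py | find_index_with_non_punctuation_start
-- ===== SOURCE A (Python) =====
-- from typing import List
--
-- def find_index_with_non_punctuation_start(indices: List[int]) -> List[int]:
--     """Removes sequential indices, keeping only the first occurrence in a sequence."""
--     if not indices:
--         return []
--
--     result = [indices[0]]
--
--     for i in range(1, len(indices)):
--         # Add index if it's not consecutive with the previous index
--         if indices[i] != indices[i - 1] + 1:
--             result.append(indices[i])
--         elif i == 1:  # Keep the first in a consecutive sequence
--             result.append(indices[i])
--         else:  # Replace the last item with the current index
--             result[-1] = indices[i]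
--
--     return result
-- ===== SOURCE B (Python) =====
-- from typing import List
--
-- def find_index_with_non_punctuation_start(indices: List[int]) -> List[int]:
--     """Removes sequential indices, keeping one representative per consecutive run.
--
--     Stateless two-part formulation: keep the first element, then every element
--     of the tail that ends a maximal consecutive run (its successor-pair filter),
--     plus the tail's last element.
--     """
--     if not indices:
--         return []
--     first, rest = indices[0], indices[1:]
--     out = [first]
--     out.extend(y for y, z in zip(rest, rest[1:]) if z != y + 1)
--     if rest:
--         out.append(rest[-1])
--     return out
-- ===== Notes on version B (the rewrite author's own statement) =====
-- stated objective: alternative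
-- what changed: Replaced A's stateful loop (append / replace-last mutation driven by the i==1 special case) with a stateless formulation: keep the first element, then filter the tail's adjacent pairs (zip) for run-ending elements and append the tail's last element.
import Mathlib
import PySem

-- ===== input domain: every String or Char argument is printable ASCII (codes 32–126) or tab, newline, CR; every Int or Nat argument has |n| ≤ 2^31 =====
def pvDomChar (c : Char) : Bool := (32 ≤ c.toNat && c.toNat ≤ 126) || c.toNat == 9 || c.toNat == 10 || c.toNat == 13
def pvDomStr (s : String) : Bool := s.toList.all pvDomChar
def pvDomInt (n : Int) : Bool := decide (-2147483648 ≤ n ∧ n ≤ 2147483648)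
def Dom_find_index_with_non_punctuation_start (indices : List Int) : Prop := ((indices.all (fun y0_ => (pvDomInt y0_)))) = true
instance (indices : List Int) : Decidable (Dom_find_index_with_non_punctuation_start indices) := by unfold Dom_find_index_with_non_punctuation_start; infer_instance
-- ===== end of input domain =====

-- ===== PORT A =====
-- B re-derives the same run-collapsed list by a stateless adjacent-pair filter instead of
-- A's stateful append/replace-last loop (alternative decomposition; same return value).
def find_index_with_non_punctuation_start (indices : List Int) : List Int :=
  match indices with
  | [] => []
  | x :: _ =>
    (PySem.List.pyRange 1 (indices.length : Int) 1).foldl (fun result i =>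
      if PySem.List.pyGetD indices i 0 ≠ PySem.List.pyGetD indices (i - 1) 0 + 1 then
        result ++ [PySem.List.pyGetD indices i 0]
      else if i = 1 then
        result ++ [PySem.List.pyGetD indices i 0]
      else
        result.dropLast ++ [PySem.List.pyGetD indices i 0]) [x]

-- ===== PORT B =====
def find_index_with_non_punctuation_start_alt (indices : List Int) : List Int :=
  match indices with
  | [] => []
  | first :: rest =>
    let out := first ::
      ((rest.zip (PySem.List.slice rest (some 1) none)).filter
        (fun p => !(p.2 == p.1 + 1))).map (fun p => p.1)
    if rest ≠ [] then out ++ [PySem.List.pyGetD rest (-1) 0] else out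

-- ===== PRECONDITION & SPEC =====
def Spec_find_index_with_non_punctuation_start (indices : List Int) (out : List Int) : Prop := out = find_index_with_non_punctuation_start_alt indices
instance (indices : List Int) (out : List Int) : Decidable (Spec_find_index_with_non_punctuation_start indices out) := by unfold Spec_find_index_with_non_punctuation_start; infer_instance

-- ===== CLAIM (what is proved, stated in full; the proofs are below) =====
def Claim_equal_find_index_with_non_punctuation_start : Prop := ∀ (indices : List Int), Dom_find_index_with_non_punctuation_start indices → Spec_find_index_with_non_punctuation_start indices (find_index_with_non_punctuation_start indices)

-- ===== LEMMAS AND PROOFS =====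

-- the common value: elements of the tail that end a maximal consecutive run, plus its last element
def runEnds : List Int → List Int
  | [] => []
  | [y] => [y]
  | y :: z :: t => if z = y + 1 then runEnds (z :: t) else y :: runEnds (z :: t)

-- B's adjacent-pair filter plus trailing last element computes runEnds
theorem alt_eq_runEnds (rest : List Int) (h : rest ≠ []) :
    ((rest.zip rest.tail).filter (fun p => !(p.2 == p.1 + 1))).map (fun p => p.1)
      ++ [rest.getLast h] = runEnds rest := by
  induction rest with
  | nil => exact absurd rfl h
  | cons y t ih =>
    cases t with
    | nil => simp [runEnds]
    | cons z t' =>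
      have ih' := ih (by simp)
      simp only [List.tail_cons] at ih'
      rw [List.getLast_cons (by simp)]
      simp only [List.tail_cons, List.zip_cons_cons, List.filter_cons, runEnds]
      by_cases hc : z = y + 1
      · rw [if_pos hc, if_neg (by simp [hc])]
        exact ih'
      · rw [if_neg hc, if_pos (by simp [hc])]
        simp only [List.map_cons, List.cons_append, ih']

-- A's tail loop (from i = k+1 on, state r ++ [xs[k]]) computes runEnds of the suffix
theorem loop_eq_runEnds (xs : List Int) (m k : Nat) (r : List Int)
    (hk : 1 ≤ k) (hm : k + 1 + m = xs.length) :
    (PySem.List.pyRange ((k : Int) + 1) (xs.length : Int) 1).foldl (fun result i =>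
      if PySem.List.pyGetD xs i 0 ≠ PySem.List.pyGetD xs (i - 1) 0 + 1 then
        result ++ [PySem.List.pyGetD xs i 0]
      else if i = 1 then
        result ++ [PySem.List.pyGetD xs i 0]
      else
        result.dropLast ++ [PySem.List.pyGetD xs i 0])
      (r ++ [PySem.List.pyGetD xs (k : Int) 0])
    = r ++ runEnds (xs.drop k) := by
  induction m generalizing k r with
  | zero =>
    have hlt : k < xs.length := by omega
    rw [PySem.List.pyRange_one_eq_nil (by omega)]
    rw [List.drop_eq_getElem_cons hlt, List.drop_eq_nil_of_le (by omega)]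
    simp [runEnds, PySem.List.pyGetD_natCast, List.getD, hlt]
  | succ m ih =>
    have hk1 : k + 1 < xs.length := by omega
    have hk0 : k < xs.length := by omega
    have hgk : PySem.List.pyGetD xs (k : Int) 0 = xs[k] := by
      rw [PySem.List.pyGetD_natCast]; simp [List.getD, hk0]
    have hcast : ((k : Int) + 1) = ((k + 1 : Nat) : Int) := by push_cast; ring
    have hinit : PySem.List.pyGetD xs ((k + 1 : Nat) : Int) 0 = xs[k + 1] := by
      rw [PySem.List.pyGetD_natCast]; simp [List.getD, hk1]
    have hget : PySem.List.pyGetD xs ((k : Int) + 1) 0 = xs[k + 1] := by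
      rw [hcast, hinit]
    have hget' : PySem.List.pyGetD xs ((k : Int) + 1 - 1) 0 = xs[k] := by
      rw [show (k : Int) + 1 - 1 = (k : Int) by ring, hgk]
    have hdrop : xs.drop k = xs[k] :: xs.drop (k + 1) := List.drop_eq_getElem_cons hk0
    have hdrop1 : xs.drop (k + 1) = xs[k + 1] :: xs.drop (k + 2) := List.drop_eq_getElem_cons hk1
    have hrange : (k : Int) + 1 + 1 = ((k + 1 : Nat) : Int) + 1 := by push_cast; ring
    rw [hgk, PySem.List.pyRange_one_cons (by omega), List.foldl_cons]
    rw [hget, hget', hrange]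
    by_cases hc : xs[k + 1] = xs[k] + 1
    · rw [if_neg (by simpa using hc), if_neg (by omega), List.dropLast_concat]
      rw [← hinit, ih (k + 1) r (by omega) (by omega), hdrop, hdrop1]
      simp [runEnds, hc]
    · rw [if_pos (by simpa using hc)]
      rw [← hinit, ih (k + 1) (r ++ [xs[k]]) (by omega) (by omega), hdrop, hdrop1]
      simp [runEnds, hc]

-- ===== VERDICT (by name: the statement is the Claim_ definition above) =====
theorem find_index_with_non_punctuation_start_spec : Claim_equal_find_index_with_non_punctuation_start := by
  intro indices _
  unfold Spec_find_index_with_non_punctuation_start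
  match indices with
  | [] => rfl
  | [x] =>
    simp only [find_index_with_non_punctuation_start, find_index_with_non_punctuation_start_alt]
    rw [PySem.List.pyRange_one_eq_nil (by norm_num)]
    simp [PySem.List.slice_from_one]
  | x :: y :: t =>
    simp only [find_index_with_non_punctuation_start, find_index_with_non_punctuation_start_alt]
    have hlen : ((x :: y :: t).length : Int) = (t.length : Int) + 2 := by
      simp; ring
    rw [PySem.List.pyRange_one_cons (by rw [hlen]; omega), List.foldl_cons]
    have hstep : (if PySem.List.pyGetD (x :: y :: t) 1 0 ≠
          PySem.List.pyGetD (x :: y :: t) (1 - 1) 0 + 1 then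
          [x] ++ [PySem.List.pyGetD (x :: y :: t) 1 0]
        else if (1 : Int) = 1 then [x] ++ [PySem.List.pyGetD (x :: y :: t) 1 0]
        else [x].dropLast ++ [PySem.List.pyGetD (x :: y :: t) 1 0])
        = [x] ++ [PySem.List.pyGetD (x :: y :: t) 1 0] := by
      split <;> norm_num
    rw [hstep, show (1 : Int) + 1 = 2 by norm_num]
    have hmain := loop_eq_runEnds (x :: y :: t) t.length 1 [x] (by omega) (by simp; ring)
    rw [show ((1 : Nat) : Int) + 1 = (2 : Int) by norm_num] at hmain
    rw [show ((1 : Nat) : Int) = (1 : Int) by norm_num] at hmain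
    rw [hmain]
    have halt := alt_eq_runEnds (y :: t) (by simp)
    rw [PySem.List.slice_from_one, if_pos (by simp),
        PySem.List.pyGetD_neg_one (y :: t) 0 (by simp)]
    simp only [List.tail_cons] at halt
    simp only [List.drop_succ_cons, List.drop_zero]
    rw [← halt]
    simp
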